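-- pv_equiv track=rewrite | github.com/TheAxiomFoundation/axiom-encode | src/axiom_encode/harness/evals.py | _contiguous_completed_case_count
-- ===== SOURCE A (Python) =====
-- def _contiguous_completed_case_count(
--     completed_case_indexes: set[int],
--     total_cases: int,
-- ) -> int:
--     """Return the largest completed case prefix represented in the ledger."""
--     completed = 0
--     for index in range(1, total_cases + 1):
--         if index not in completed_case_indexes:
--             break
--         completed = index
--     return completed
-- ===== SOURCE B (Python) =====
-- def _contiguous_completed_case_count(
--     completed_case_indexes: set[int],
--     total_cases: int,
-- ) -> int:
--     """Return the largest completed case prefix represented in the ledger."""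
--     sorted_vals = sorted(v for v in completed_case_indexes if 1 <= v <= total_cases)
--     expected = 1
--     for v in sorted_vals:
--         if v != expected:
--             break
--         expected += 1
--     return expected - 1
-- ===== Notes on version B (the rewrite author's own statement) =====
-- stated objective: alternative
-- what changed: Replaces per-index membership probing over range(1, total_cases+1) with a single sort-then-scan over the set's own in-range elements, returning the length of the contiguous run 1,2,3,....
import Mathlib
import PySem

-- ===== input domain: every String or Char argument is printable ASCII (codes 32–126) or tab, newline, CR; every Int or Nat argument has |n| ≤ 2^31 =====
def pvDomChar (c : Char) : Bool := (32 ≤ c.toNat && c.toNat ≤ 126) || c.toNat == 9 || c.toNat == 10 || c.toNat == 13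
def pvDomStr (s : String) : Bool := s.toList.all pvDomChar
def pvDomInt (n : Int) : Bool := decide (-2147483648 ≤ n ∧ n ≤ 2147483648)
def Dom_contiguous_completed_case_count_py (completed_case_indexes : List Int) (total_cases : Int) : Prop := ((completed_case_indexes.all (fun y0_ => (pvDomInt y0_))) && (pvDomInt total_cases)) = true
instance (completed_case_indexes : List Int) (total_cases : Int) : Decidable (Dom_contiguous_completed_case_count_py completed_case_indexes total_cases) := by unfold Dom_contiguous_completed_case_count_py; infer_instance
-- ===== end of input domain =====

-- B replaces A's per-index membership probing over range(1, total_cases+1) with one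
-- sort-then-scan pass over the set's own in-range elements (alternative decomposition).


-- ===== PORT A =====
-- the for-loop with break: walk the range list, stopping at the first missing index
def pvLoopA (s : List Int) : List Int → Int → Int
  | [], completed => completed
  | i :: rest, completed => if i ∈ s then pvLoopA s rest i else completed

def contiguous_completed_case_count_py (completed_case_indexes : List Int) (total_cases : Int) : Int :=
  pvLoopA completed_case_indexes (PySem.List.pyRange 1 (total_cases + 1) 1) 0

-- ===== PORT B =====
-- walk the sorted in-range values with an `expected` counter, break on the first gap
def pvLoopB : List Int → Int → Int
  | [], expected => expected - 1
  | v :: rest, expected => if v ≠ expected then expected - 1 else pvLoopB rest (expected + 1)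

def contiguous_completed_case_count_py_alt (completed_case_indexes : List Int) (total_cases : Int) : Int :=
  let sorted_vals :=
    PySem.List.sorted (completed_case_indexes.filter (fun v => decide (1 ≤ v) && decide (v ≤ total_cases)))
      (fun x => x) false
  pvLoopB sorted_vals 1

-- ===== PRECONDITION & SPEC =====
-- Pre_ only states that the list faithfully represents A's Python `set[int]` argument:
-- its elements are distinct (on duplicate-carrying lists B's scan stops early, a shape a set never has).
def Pre_contiguous_completed_case_count_py (completed_case_indexes : List Int) (total_cases : Int) : Prop :=
  completed_case_indexes.Nodup
instance (completed_case_indexes : List Int) (total_cases : Int) : Decidable (Pre_contiguous_completed_case_count_py completed_case_indexes total_cases) := by unfold Pre_contiguous_completed_case_count_py; infer_instance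

def pvWitness_contiguous_completed_case_count_py : List Int × Int := ([2, 1, 4], 3)

def Spec_contiguous_completed_case_count_py (completed_case_indexes : List Int) (total_cases : Int) (out : Int) : Prop := out = contiguous_completed_case_count_py_alt completed_case_indexes total_cases
instance (completed_case_indexes : List Int) (total_cases : Int) (out : Int) : Decidable (Spec_contiguous_completed_case_count_py completed_case_indexes total_cases out) := by unfold Spec_contiguous_completed_case_count_py; infer_instance

-- ===== CLAIM (what is proved, stated in full; the proofs are below) =====
def Claim_equal_contiguous_completed_case_count_py : Prop := ∀ (completed_case_indexes : List Int) (total_cases : Int), Dom_contiguous_completed_case_count_py completed_case_indexes total_cases → Pre_contiguous_completed_case_count_py completed_case_indexes total_cases → Spec_contiguous_completed_case_count_py completed_case_indexes total_cases (contiguous_completed_case_count_py completed_case_indexes total_cases)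

-- ===== LEMMAS AND PROOFS =====

-- Characterisation of A's loop result, generalised over the start of the range.
theorem pvLoopA_spec (s : List Int) (t : Int) :
    ∀ (fuel : Nat) (a : Int), (t + 1 - a).toNat = fuel →
      a - 1 ≤ pvLoopA s (PySem.List.pyRange a (t + 1) 1) (a - 1) ∧
      pvLoopA s (PySem.List.pyRange a (t + 1) 1) (a - 1) ≤ max (a - 1) t ∧
      (∀ i, a ≤ i → i ≤ pvLoopA s (PySem.List.pyRange a (t + 1) 1) (a - 1) → i ∈ s) ∧
      (pvLoopA s (PySem.List.pyRange a (t + 1) 1) (a - 1) + 1 ≤ t →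
        pvLoopA s (PySem.List.pyRange a (t + 1) 1) (a - 1) + 1 ∉ s) := by
  intro fuel
  induction fuel with
  | zero =>
    intro a ha
    have hba : t + 1 ≤ a := by omega
    rw [PySem.List.pyRange_one_eq_nil hba]
    simp only [pvLoopA]
    refine ⟨le_refl _, by omega, by omega, ?_⟩
    intro h; omega
  | succ n ih =>
    intro a ha
    have hab : a < t + 1 := by omega
    rw [PySem.List.pyRange_one_cons hab]
    simp only [pvLoopA]
    by_cases hmem : a ∈ s
    · simp only [hmem, if_pos]
      have ih' := ih (a + 1) (by omega)
      have hacc : a + 1 - 1 = a := by omega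
      rw [hacc] at ih'
      obtain ⟨h1, h2, h3, h4⟩ := ih'
      refine ⟨by omega, by omega, ?_, h4⟩
      intro i hi1 hi2
      by_cases hia : i = a
      · exact hia ▸ hmem
      · exact h3 i (by omega) hi2
    · simp only [hmem, if_neg, not_false_iff]
      refine ⟨le_refl _, by omega, by omega, ?_⟩
      intro _
      have : a - 1 + 1 = a := by omega
      rw [this]; exact hmem

-- Characterisation of B's scan on a strictly increasing list whose elements are ≥ e.
theorem pvLoopB_spec (vals : List Int) :
    ∀ (e : Int), vals.Pairwise (· < ·) → (∀ v ∈ vals, e ≤ v) →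
      e - 1 ≤ pvLoopB vals e ∧
      (∀ i, e ≤ i → i ≤ pvLoopB vals e → i ∈ vals) ∧
      pvLoopB vals e + 1 ∉ vals := by
  induction vals with
  | nil =>
    intro e _ _
    simp only [pvLoopB]
    exact ⟨le_refl _, by omega, by simp⟩
  | cons v rest ih =>
    intro e hpw hge
    have hrest_gt : ∀ w ∈ rest, v < w := (List.pairwise_cons.mp hpw).1
    have hpw' : rest.Pairwise (· < ·) := (List.pairwise_cons.mp hpw).2
    have hve : e ≤ v := hge v (List.mem_cons_self ..)
    simp only [pvLoopB]
    by_cases hne : v = e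
    · rw [if_neg (by simp [hne])]
      have hge' : ∀ w ∈ rest, e + 1 ≤ w := by
        intro w hw; have := hrest_gt w hw; omega
      obtain ⟨h1, h2, h3⟩ := ih (e + 1) hpw' hge'
      refine ⟨by omega, ?_, ?_⟩
      · intro i hi1 hi2
        by_cases hie : i = e
        · simp [hie, hne]
        · exact List.mem_cons.mpr (Or.inr (h2 i (by omega) hi2))
      · intro hmem
        rcases List.mem_cons.mp hmem with h | h
        · omega
        · exact h3 h
    · rw [if_pos hne]
      refine ⟨le_refl _, by omega, ?_⟩
      intro hmem
      rcases List.mem_cons.mp hmem with h | h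
      · omega
      · have := hrest_gt _ h; omega

-- ===== VERDICT (by name: the statement is the Claim_ definition above) =====
theorem contiguous_completed_case_count_py_spec : Claim_equal_contiguous_completed_case_count_py := by
  intro cs t _ hnd
  unfold Spec_contiguous_completed_case_count_py
  unfold contiguous_completed_case_count_py contiguous_completed_case_count_py_alt
  set vals := PySem.List.sorted (cs.filter (fun v => decide (1 ≤ v) && decide (v ≤ t))) (fun x => x) false with hvals
  -- membership in vals
  have hmem_vals : ∀ v : Int, v ∈ vals ↔ v ∈ cs ∧ 1 ≤ v ∧ v ≤ t := by
    intro v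
    rw [hvals, PySem.List.mem_sorted, List.mem_filter]
    simp
  -- vals is strictly increasing
  have hperm : vals.Perm (cs.filter (fun v => decide (1 ≤ v) && decide (v ≤ t))) :=
    PySem.List.sorted_perm ..
  have hnd_f : (cs.filter (fun v => decide (1 ≤ v) && decide (v ≤ t))).Nodup := hnd.filter _
  have hnd_vals : vals.Nodup := hperm.nodup_iff.mpr hnd_f
  have hle : vals.Pairwise (fun a b => a ≤ b) := PySem.List.sorted_pairwise ..
  have hpw : vals.Pairwise (· < ·) := by
    have := hle.and hnd_vals
    exact this.imp (fun h => lt_of_le_of_ne h.1 h.2)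
  have hge1 : ∀ v ∈ vals, (1 : Int) ≤ v := fun v hv => ((hmem_vals v).mp hv).2.1
  -- characterisations
  have hA := pvLoopA_spec cs t (t + 1 - 1).toNat 1 rfl
  have hB := pvLoopB_spec vals 1 hpw hge1
  have hzero : (1 : Int) - 1 = 0 := by norm_num
  rw [hzero] at hA
  obtain ⟨hA0, hAmax, hAmem, hAnot⟩ := hA
  obtain ⟨hB0, hBmem, hBnot⟩ := hB
  set rA := pvLoopA cs (PySem.List.pyRange 1 (t + 1) 1) 0 with hrA
  set rB := pvLoopB vals 1 with hrB
  -- rA ≤ t ∨ rA = 0, rB ≤ t ∨ rB = 0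
  have hrBle : rB ≤ t ∨ rB = 0 := by
    by_cases h : rB = 0
    · exact Or.inr h
    · have : rB ∈ vals := hBmem rB (by omega) (le_refl _)
      exact Or.inl ((hmem_vals rB).mp this).2.2
  rcases lt_trichotomy rA rB with h | h | h
  · -- rA < rB : rA+1 ∈ cs with rA+1 ≤ t, contradicting hAnot
    exfalso
    have hmem : rA + 1 ∈ vals := hBmem (rA + 1) (by omega) (by omega)
    have := (hmem_vals _).mp hmem
    exact hAnot (by omega) this.1
  · exact h
  · -- rB < rA : rB+1 ∈ cs ∧ 1 ≤ rB+1 ≤ t, contradicting hBnot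
    exfalso
    have hrAt : rA ≤ t := by omega
    have hmemcs : rB + 1 ∈ cs := hAmem (rB + 1) (by omega) (by omega)
    exact hBnot ((hmem_vals _).mpr ⟨hmemcs, by omega, by omega⟩)
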